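-- pv_equiv track=rewrite | github.com/jamesmparry87/ash-bot-discord | Live/bot/handlers/ai_handler.py | filter_ai_response
-- ===== SOURCE A (Python) =====
-- def filter_ai_response(response_text: str) -> str:
--     """Filter AI responses to remove verbosity and repetitive content"""
--     if not response_text:
--         return response_text
--
--     # Split into sentences
--     sentences = [s.strip() for s in response_text.split('.') if s.strip()]
--
--     # Remove duplicate sentences (case-insensitive)
--     seen_sentences = set()
--     filtered_sentences = []
--     for sentence in sentences:
--         sentence_lower = sentence.lower()
--         if sentence_lower not in seen_sentences:
--             seen_sentences.add(sentence_lower)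
--             filtered_sentences.append(sentence)
--
--     # Remove repetitive character phrases if they appear multiple times
--     repetitive_phrases = [
--         "you have my sympathies",
--         "fascinating",
--         "i do take directions well",
--         "that's quite all right",
--         "efficiency is paramount",
--         "analysis complete",
--         "mission parameters"
--     ]
--
--     # Remove sentences with overused phrases (keep only first occurrence)
--     final_sentences = []
--     phrase_used = set()
--
--     for sentence in filtered_sentences:
--         sentence_lower = sentence.lower()
--         should_keep = True
--
--         for phrase in repetitive_phrases:
--             if phrase in sentence_lower:
--                 if phrase in phrase_used:
--                     should_keep = False
--                     break
--                 phrase_used.add(phrase)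
--
--         if should_keep:
--             final_sentences.append(sentence)
--
--     # Limit to maximum 10 sentences for conciseness
--     final_sentences = final_sentences[:10]
--
--     # Reconstruct response
--     result = '. '.join(final_sentences)
--     if result and not result.endswith('.'):
--         result += '.'
--
--     return result
-- ===== SOURCE B (Python) =====
-- def filter_ai_response(response_text: str) -> str:
--     """Single-pass filter: dedup + repeated-phrase drop fused, stopping once 10 sentences are kept."""
--     repetitive_phrases = [
--         "you have my sympathies",
--         "fascinating",
--         "i do take directions well",
--         "that's quite all right",
--         "efficiency is paramount",
--         "analysis complete",
--         "mission parameters",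
--     ]
--
--     seen = set()
--     phrase_used = set()
--     kept = []
--
--     for part in response_text.split('.'):
--         sentence = part.strip()
--         if not sentence:
--             continue
--         low = sentence.lower()
--         if low in seen:
--             continue
--         seen.add(low)
--         drop = False
--         for phrase in repetitive_phrases:
--             if phrase in low:
--                 if phrase in phrase_used:
--                     drop = True
--                     break
--                 phrase_used.add(phrase)
--         if not drop:
--             kept.append(sentence)
--             if len(kept) == 10:
--                 break
--
--     result = '. '.join(kept)
--     if result and not result.endswith('.'):
--         result += '.'
--     return result
-- ===== Notes on version B (the rewrite author's own statement) =====
-- stated objective: simpler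
-- what changed: Fuses A's three phases (dedup pass, phrase-filter pass, slice to 10) into one pass over the split parts that strips, dedups and phrase-checks each sentence in the same iteration and stops early as soon as 10 sentences are kept.
import Mathlib
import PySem

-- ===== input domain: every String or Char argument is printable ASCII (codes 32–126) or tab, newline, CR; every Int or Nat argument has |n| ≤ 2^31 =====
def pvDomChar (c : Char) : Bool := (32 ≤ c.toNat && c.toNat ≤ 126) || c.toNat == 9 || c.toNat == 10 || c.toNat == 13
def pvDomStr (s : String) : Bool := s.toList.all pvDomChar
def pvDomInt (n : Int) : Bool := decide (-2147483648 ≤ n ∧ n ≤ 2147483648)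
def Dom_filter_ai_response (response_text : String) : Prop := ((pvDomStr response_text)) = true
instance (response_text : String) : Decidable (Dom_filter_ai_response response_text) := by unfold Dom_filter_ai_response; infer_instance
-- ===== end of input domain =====

-- B fuses A's three phases (dedup pass, phrase-filter pass, slice to 10) into one pass with an early stop at 10 kept sentences; same return value.

-- ===== PORT A =====
def pvPhrases : List (List Char) :=
  ["you have my sympathies".toList, "fascinating".toList, "i do take directions well".toList,
   "that's quite all right".toList, "efficiency is paramount".toList, "analysis complete".toList,
   "mission parameters".toList]

-- A's inner 'for phrase in repetitive_phrases' loop: returns (phrase_used, should_keep)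
def pvScanA (low : List Char) : List (List Char) → PySem.Set (List Char) → PySem.Set (List Char) × Bool
  | [], used => (used, true)
  | p :: ps, used =>
    if PySem.Chars.isIn p low then
      if PySem.Set.contains used p then (used, false)
      else pvScanA low ps (PySem.Set.add used p)
    else pvScanA low ps used

def pvCoreA (cs : List Char) : List Char :=
  let sentences := ((PySem.Chars.splitOn cs ['.']).map PySem.Chars.strip).filter (fun t => t ≠ [])
  let st1 := sentences.foldl (fun (st : PySem.Set (List Char) × List (List Char)) s =>
      let low := PySem.Chars.lower s
      if PySem.Set.contains st.1 low then st
      else (PySem.Set.add st.1 low, st.2 ++ [s])) (PySem.Set.empty, [])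
  let st2 := st1.2.foldl (fun (st : PySem.Set (List Char) × List (List Char)) s =>
      let low := PySem.Chars.lower s
      let r := pvScanA low pvPhrases st.1
      if r.2 then (r.1, st.2 ++ [s]) else (r.1, st.2)) (PySem.Set.empty, [])
  let finals := st2.2.take 10
  let result := PySem.Chars.join ". ".toList finals
  if result ≠ [] ∧ PySem.Chars.endswith result ['.'] = false then result ++ ['.'] else result

def filter_ai_response (response_text : String) : String :=
  if response_text = "" then response_text
  else String.ofList (pvCoreA response_text.toList)

-- ===== PORT B =====
-- B's inner phrase loop: returns (phrase_used, drop)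
def pvScanB (low : List Char) : List (List Char) → PySem.Set (List Char) → PySem.Set (List Char) × Bool
  | [], used => (used, false)
  | p :: ps, used =>
    if PySem.Chars.isIn p low then
      if PySem.Set.contains used p then (used, true)
      else pvScanB low ps (PySem.Set.add used p)
    else pvScanB low ps used

-- B's single fused loop over the split parts, stopping once 10 sentences are kept
def pvLoopB : List (List Char) → PySem.Set (List Char) → PySem.Set (List Char) → List (List Char) → List (List Char)
  | [], _, _, kept => kept
  | part :: rest, seen, used, kept =>
    let s := PySem.Chars.strip part
    if s = [] then pvLoopB rest seen used kept
    else
      let low := PySem.Chars.lower s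
      if PySem.Set.contains seen low then pvLoopB rest seen used kept
      else
        let seen' := PySem.Set.add seen low
        let r := pvScanB low pvPhrases used
        if r.2 then pvLoopB rest seen' r.1 kept
        else
          let kept' := kept ++ [s]
          if kept'.length = 10 then kept' else pvLoopB rest seen' r.1 kept'

def filter_ai_response_alt (response_text : String) : String :=
  let kept := pvLoopB (PySem.Chars.splitOn response_text.toList ['.']) PySem.Set.empty PySem.Set.empty []
  let result := PySem.Chars.join ". ".toList kept
  String.ofList (if result ≠ [] ∧ PySem.Chars.endswith result ['.'] = false then result ++ ['.'] else result)

-- ===== PRECONDITION & SPEC =====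
def Spec_filter_ai_response (response_text : String) (out : String) : Prop := out = filter_ai_response_alt response_text
instance (response_text : String) (out : String) : Decidable (Spec_filter_ai_response response_text out) := by unfold Spec_filter_ai_response; infer_instance

-- ===== CLAIM (what is proved, stated in full; the proofs are below) =====
def Claim_equal_filter_ai_response : Prop := ∀ (response_text : String), Dom_filter_ai_response response_text → Spec_filter_ai_response response_text (filter_ai_response response_text)

-- ===== LEMMAS AND PROOFS =====

-- structural form of A's dedup loop (proof helper)
def pvDedup : List (List Char) → PySem.Set (List Char) → List (List Char)
  | [], _ => []
  | s :: r, seen =>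
    let low := PySem.Chars.lower s
    if PySem.Set.contains seen low then pvDedup r seen
    else s :: pvDedup r (PySem.Set.add seen low)

-- structural form of A's phrase-filter loop (proof helper)
def pvPhase2 : List (List Char) → PySem.Set (List Char) → List (List Char)
  | [], _ => []
  | s :: r, used =>
    let res := pvScanA (PySem.Chars.lower s) pvPhrases used
    if res.2 then s :: pvPhase2 r res.1 else pvPhase2 r res.1

-- B's loop restated over the already-stripped nonempty sentences (proof helper)
def pvLoopB2 : List (List Char) → PySem.Set (List Char) → PySem.Set (List Char) → List (List Char) → List (List Char)
  | [], _, _, kept => kept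
  | s :: rest, seen, used, kept =>
    let low := PySem.Chars.lower s
    if PySem.Set.contains seen low then pvLoopB2 rest seen used kept
    else
      let seen' := PySem.Set.add seen low
      let r := pvScanB low pvPhrases used
      if r.2 then pvLoopB2 rest seen' r.1 kept
      else
        let kept' := kept ++ [s]
        if kept'.length = 10 then kept' else pvLoopB2 rest seen' r.1 kept'

theorem pvScanB_eq (low : List Char) (ps : List (List Char)) (used : PySem.Set (List Char)) :
    pvScanB low ps used = ((pvScanA low ps used).1, !(pvScanA low ps used).2) := by
  induction ps generalizing used with
  | nil => simp [pvScanA, pvScanB]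
  | cons p ps ih =>
    simp only [pvScanA, pvScanB]
    split_ifs <;> simp [ih]

theorem pvDedup_fold (ss : List (List Char)) (seen : PySem.Set (List Char)) (acc : List (List Char)) :
    (ss.foldl (fun (st : PySem.Set (List Char) × List (List Char)) s =>
      let low := PySem.Chars.lower s
      if PySem.Set.contains st.1 low then st
      else (PySem.Set.add st.1 low, st.2 ++ [s])) (seen, acc)).2 = acc ++ pvDedup ss seen := by
  induction ss generalizing seen acc with
  | nil => simp [pvDedup]
  | cons s r ih =>
    simp only [List.foldl_cons, pvDedup]
    split_ifs with h
    · exact ih _ _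
    · rw [ih _ _]; simp

theorem pvPhase2_fold (ss : List (List Char)) (used : PySem.Set (List Char)) (acc : List (List Char)) :
    (ss.foldl (fun (st : PySem.Set (List Char) × List (List Char)) s =>
      let low := PySem.Chars.lower s
      let r := pvScanA low pvPhrases st.1
      if r.2 then (r.1, st.2 ++ [s]) else (r.1, st.2)) (used, acc)).2 = acc ++ pvPhase2 ss used := by
  induction ss generalizing used acc with
  | nil => simp [pvPhase2]
  | cons s r ih =>
    simp only [List.foldl_cons, pvPhase2]
    split_ifs with h
    · rw [ih _ _]; simp
    · exact ih _ _

theorem pvLoopB_eq_loopB2 (parts : List (List Char)) (seen used : PySem.Set (List Char)) (kept : List (List Char)) :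
    pvLoopB parts seen used kept =
      pvLoopB2 ((parts.map PySem.Chars.strip).filter (fun t => t ≠ [])) seen used kept := by
  induction parts generalizing seen used kept with
  | nil => simp [pvLoopB, pvLoopB2]
  | cons p r ih =>
    by_cases h : PySem.Chars.strip p = []
    · simp [pvLoopB, h, ih]
    · simp only [pvLoopB, List.map_cons, List.filter_cons, ne_eq, h, not_false_eq_true,
        decide_true, if_true, pvLoopB2]
      simp only [ih]
      simp

theorem pvLoopB2_eq (ss : List (List Char)) (seen used : PySem.Set (List Char)) (kept : List (List Char))
    (hk : kept.length < 10) :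
    pvLoopB2 ss seen used kept = (kept ++ pvPhase2 (pvDedup ss seen) used).take 10 := by
  induction ss generalizing seen used kept with
  | nil =>
    simp [pvLoopB2, pvDedup, pvPhase2, List.take_of_length_le (Nat.le_of_lt hk)]
  | cons s r ih =>
    simp only [pvLoopB2, pvDedup, pvScanB_eq]
    by_cases h : PySem.Set.contains seen (PySem.Chars.lower s) = true
    · rw [if_pos h, if_pos h]
      exact ih _ _ _ hk
    · rw [if_neg h, if_neg h]
      simp only [pvPhase2]
      by_cases hkeep : (pvScanA (PySem.Chars.lower s) pvPhrases used).2 = true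
      · simp only [hkeep, Bool.not_true, Bool.false_eq_true, if_false, if_true]
        by_cases hlen : (kept ++ [s]).length = 10
        · rw [if_pos hlen,
            show kept ++ s :: pvPhase2 (pvDedup r (PySem.Set.add seen (PySem.Chars.lower s)))
                (pvScanA (PySem.Chars.lower s) pvPhrases used).1
              = (kept ++ [s]) ++ pvPhase2 (pvDedup r (PySem.Set.add seen (PySem.Chars.lower s)))
                (pvScanA (PySem.Chars.lower s) pvPhrases used).1 by simp, ← hlen, List.take_left]
        · have hk' : (kept ++ [s]).length < 10 := by
            simp only [List.length_append, List.length_singleton] at hlen ⊢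
            omega
          rw [if_neg hlen, ih _ _ _ hk']
          simp
      · have hb : (pvScanA (PySem.Chars.lower s) pvPhrases used).2 = false := by
          simpa using hkeep
        simp only [hb, Bool.not_false, Bool.false_eq_true, if_true, if_false]
        exact ih _ _ _ hk

theorem pvCore_eq (cs : List Char) :
    pvCoreA cs = (let kept := pvLoopB (PySem.Chars.splitOn cs ['.']) PySem.Set.empty PySem.Set.empty []
      let result := PySem.Chars.join ". ".toList kept
      if result ≠ [] ∧ PySem.Chars.endswith result ['.'] = false then result ++ ['.'] else result) := by
  simp only [pvCoreA, pvLoopB_eq_loopB2, pvLoopB2_eq _ PySem.Set.empty PySem.Set.empty [] (by decide), pvDedup_fold, pvPhase2_fold,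
    List.nil_append]

-- ===== VERDICT (by name: the statement is the Claim_ definition above) =====
theorem filter_ai_response_spec : Claim_equal_filter_ai_response := by
  intro s _
  unfold Spec_filter_ai_response filter_ai_response filter_ai_response_alt
  by_cases h : s = ""
  · subst h; decide
  · rw [if_neg h, pvCore_eq]
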